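-- pv_equiv track=rewrite | github.com/Cagomei/AllTheThings | .contrib/Harvesters/Database Harvester/Harvester.py | remove_empty_builds
-- ===== SOURCE A (Python) =====
-- def remove_empty_builds(lines: list[str]) -> list[str]:
--     """Remove builds that don't have any IDs."""
--     clean_lines = [lines[0]]
--     for line in lines[1:]:
--         if not line.rstrip().isnumeric() and not clean_lines[-1].rstrip().isnumeric():
--             clean_lines.pop()
--         clean_lines.append(line)
--     if not clean_lines[-1].rstrip().isnumeric():
--         clean_lines.pop()
--     return clean_lines
-- ===== SOURCE B (Python) =====
-- def remove_empty_builds(lines: list[str]) -> list[str]: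
--     """Remove builds that don't have any IDs."""
--     def numeric(s):
--         return s.rstrip().isnumeric()
--     return [cur for cur, nxt in zip(lines, lines[1:] + [""]) if numeric(cur) or numeric(nxt)]
-- ===== Notes on version B (the rewrite author's own statement) =====
-- stated objective: simpler
-- what changed: Replaces A's stack-style loop (conditional pop of the previous line plus a trailing fixup pop) by a single zip-with-lookahead filter: a line is kept iff it or its immediate successor is numeric after rstrip.
import Mathlib
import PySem

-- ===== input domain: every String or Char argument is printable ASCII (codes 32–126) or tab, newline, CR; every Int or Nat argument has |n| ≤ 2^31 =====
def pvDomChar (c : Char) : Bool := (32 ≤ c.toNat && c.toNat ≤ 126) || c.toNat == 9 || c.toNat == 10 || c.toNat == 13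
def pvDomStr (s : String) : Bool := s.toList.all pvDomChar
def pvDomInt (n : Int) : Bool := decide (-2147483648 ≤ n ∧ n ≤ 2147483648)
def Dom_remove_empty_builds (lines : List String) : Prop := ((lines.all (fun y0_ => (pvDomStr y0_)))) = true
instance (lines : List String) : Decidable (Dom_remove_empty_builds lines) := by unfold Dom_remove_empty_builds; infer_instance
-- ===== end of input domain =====

-- B replaces A's stack-with-pop loop and trailing fixup by a single zip-with-lookahead
-- filter (a line survives iff it or its successor is numeric); objective: simpler.
-- On the ASCII domain, Python's str.isnumeric() agrees with isdigit (PySem.Str.strIsdigit).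

-- ===== PORT A =====
-- line.rstrip().isnumeric()
def pvNum (s : String) : Bool := PySem.Str.strIsdigit (PySem.Str.rstrip s)

-- one iteration of A's for-loop (clean_lines[-1] read via getLast?; the list is
-- never empty when Python reads it, so the default "" is never used on Pre_ inputs)
def pvStepA (clean : List String) (line : String) : List String :=
  (if ¬ pvNum line ∧ ¬ pvNum ((clean.getLast?).getD "") then clean.dropLast else clean) ++ [line]

def remove_empty_builds (lines : List String) : List String :=
  match PySem.List.pyGet? lines 0 with
  | none => []   -- Python raises IndexError here (excluded by Pre_)
  | some l0 =>
    let clean := (PySem.List.slice lines (some 1) none).foldl pvStepA [l0]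
    if ¬ pvNum ((clean.getLast?).getD "") then clean.dropLast else clean

-- ===== PORT B =====
def remove_empty_builds_alt (lines : List String) : List String :=
  ((lines.zip (PySem.List.slice lines (some 1) none ++ [""])).filter
    (fun p => pvNum p.1 || pvNum p.2)).map Prod.fst

-- ===== PRECONDITION & SPEC =====
-- Pre_ excludes only the empty list, on which Python A raises IndexError (lines[0]).
def Pre_remove_empty_builds (lines : List String) : Prop := lines ≠ []
instance (lines : List String) : Decidable (Pre_remove_empty_builds lines) := by
  unfold Pre_remove_empty_builds; infer_instance
def pvWitness_remove_empty_builds : List String := ["Build", "17", "junk"]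

def Spec_remove_empty_builds (lines : List String) (out : List String) : Prop :=
  out = remove_empty_builds_alt lines
instance (lines : List String) (out : List String) : Decidable (Spec_remove_empty_builds lines out) := by
  unfold Spec_remove_empty_builds; infer_instance

-- ===== CLAIM (what is proved, stated in full; the proofs are below) =====
def Claim_equal_remove_empty_builds : Prop := ∀ (lines : List String), Dom_remove_empty_builds lines → Pre_remove_empty_builds lines → Spec_remove_empty_builds lines (remove_empty_builds lines)

-- ===== LEMMAS AND PROOFS =====

-- K q t = the lines of q that survive, where the successor of q's last element is t
def pvK (q : List String) (t : String) : List String :=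
  match q with
  | [] => []
  | x :: xs => (if pvNum x || pvNum (xs.headD t) then [x] else []) ++ pvK xs t

lemma pvK_append (q : List String) (t u : String) :
    pvK (q ++ [t]) u = pvK q t ++ (if pvNum t || pvNum u then [t] else []) := by
  induction q with
  | nil => simp [pvK]
  | cons x xs ih =>
    cases xs with
    | nil => simp [pvK]
    | cons y ys => simp [pvK] at ih ⊢; rw [ih]

lemma pvNum_empty : pvNum "" = false := by decide

lemma alt_nil : remove_empty_builds_alt [] = [] := by
  simp [remove_empty_builds_alt]

lemma alt_cons (x : String) (xs : List String) :
    remove_empty_builds_alt (x :: xs) =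
      (if pvNum x || pvNum (xs.headD "") then [x] else []) ++ remove_empty_builds_alt xs := by
  cases xs with
  | nil =>
    simp only [remove_empty_builds_alt, PySem.List.slice_from_one, List.tail]
    simp only [List.nil_append, List.zip_cons_cons, List.zip_nil_left, List.filter,
      List.headD, pvNum_empty, Bool.or_false]
    split <;> simp_all
  | cons y ys =>
    simp only [remove_empty_builds_alt, PySem.List.slice_from_one, List.tail, List.headD]
    simp only [List.cons_append, List.zip_cons_cons, List.filter_cons]
    split <;> simp_all

lemma pvStepA_state (q : List String) (t u : String) :
    pvStepA (pvK q t ++ [t]) u = pvK (q ++ [t]) u ++ [u] := by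
  unfold pvStepA
  rw [pvK_append]
  have hlast : ((pvK q t ++ [t]).getLast?).getD "" = t := by simp
  rw [hlast]
  by_cases hu : pvNum u = true <;> by_cases ht : pvNum t = true <;>
    simp [hu, ht]

lemma pvInv (ls : List String) (q : List String) (t : String) :
    (if ¬ pvNum (((List.foldl pvStepA (pvK q t ++ [t]) ls).getLast?).getD "") then
       (List.foldl pvStepA (pvK q t ++ [t]) ls).dropLast
     else List.foldl pvStepA (pvK q t ++ [t]) ls)
      = pvK q t ++ remove_empty_builds_alt (t :: ls) := by
  induction ls generalizing q t with
  | nil =>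
    simp only [List.foldl_nil]
    rw [alt_cons, alt_nil]
    have hlast : ((pvK q t ++ [t]).getLast?).getD "" = t := by simp
    rw [hlast]
    by_cases ht : pvNum t = true <;> simp [ht, pvNum_empty]
  | cons u ls ih =>
    simp only [List.foldl_cons]
    rw [pvStepA_state, ih (q ++ [t]) u, pvK_append,
      alt_cons (x := t) (xs := u :: ls)]
    simp [List.append_assoc]

-- ===== VERDICT (by name: the statement is the Claim_ definition above) =====
theorem remove_empty_builds_spec : Claim_equal_remove_empty_builds := by
  intro lines _ hpre
  unfold Spec_remove_empty_builds
  cases lines with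
  | nil => exact absurd rfl hpre
  | cons l0 ls =>
    show remove_empty_builds (l0 :: ls) = _
    have := pvInv ls [] l0
    simp only [pvK, List.nil_append] at this
    unfold remove_empty_builds
    have hg : PySem.List.pyGet? (l0 :: ls) (0 : Int) = some l0 := by
      simp [PySem.List.pyGet?, PySem.List.pyIdx?]
    rw [hg]
    simp only [PySem.List.slice_from_one, List.tail_cons]
    exact this
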